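-- pv_equiv track=rewrite | github.com/naru3-99/lib763 | lib763/scraping/scraping.py | get_enclosed_strings
-- ===== SOURCE A (Python) =====
-- def get_enclosed_strings(sentence: str) -> list:
--     """
--     @param:
--         sentence str  htmlテキスト
--     @return:
--         list 引っかかった文字列
--     >aaa<となっている場合、aaaを返す。
--     """
--     result = []
--     start = 0
--     while True:
--         start = sentence.find(">", start)
--         if start == -1:
--             break
--         end = sentence.find("<", start + 1)
--         if end == -1:
--             break
--         enclosed_str = sentence[start + 1 : end]
--         if len(enclosed_str) != 0:
--             result.append(enclosed_str)
--         start = end + 1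
--     return result
-- ===== SOURCE B (Python) =====
-- def get_enclosed_strings(sentence: str) -> list:
--     # Split on '<': each chunk before the last is terminated by a '<' in the
--     # original string, so the text after the first '>' inside such a chunk is
--     # exactly one >...< enclosure; the final chunk has no closing '<' and is dropped.
--     chunks = sentence.split("<")
--     result = []
--     for chunk in chunks[:-1]:
--         pos = chunk.find(">")
--         if pos != -1 and pos + 1 < len(chunk):
--             result.append(chunk[pos + 1:])
--     return result
-- ===== Notes on version B (the rewrite author's own statement) =====
-- stated objective: alternative
-- what changed: Replaces A's single index-advancing while/find scan with a staged pass: split the string into chunks on '<', drop the last chunk, and for each remaining chunk emit the (nonempty) text after its first '>'.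
import Mathlib
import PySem

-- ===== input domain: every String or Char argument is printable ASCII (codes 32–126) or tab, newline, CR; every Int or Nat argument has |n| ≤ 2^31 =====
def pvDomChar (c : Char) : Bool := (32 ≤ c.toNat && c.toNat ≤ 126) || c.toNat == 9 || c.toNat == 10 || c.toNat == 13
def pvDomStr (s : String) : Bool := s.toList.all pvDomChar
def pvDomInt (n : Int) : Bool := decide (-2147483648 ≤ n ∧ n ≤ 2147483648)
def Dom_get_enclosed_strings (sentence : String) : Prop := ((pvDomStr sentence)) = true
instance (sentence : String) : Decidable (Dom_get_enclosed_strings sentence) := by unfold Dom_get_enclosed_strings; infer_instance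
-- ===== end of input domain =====

-- B replaces A's index-advancing while/find scan by a staged pass: split the string
-- into chunks on '<', drop the last chunk, and emit from each remaining chunk the
-- (nonempty) text after its first '>'. Alternative decomposition, no speed claim.

-- ===== PORT A =====
-- A's 'while True' loop: fuel (length+1) only makes the same computation total;
-- each iteration advances 'start' past the consumed '<', so it never runs out on the inputs reached.
def pvALoop (cs : List Char) (result : List String) (start : Int) (fuel : Nat) : List String :=
  match fuel with
  | 0 => result
  | fuel + 1 =>
    let g := PySem.Chars.findFrom cs ['>'] start none
    if g = -1 then result
    else
      let e := PySem.Chars.findFrom cs ['<'] (g + 1) none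
      if e = -1 then result
      else
        let enclosed := PySem.List.slice cs (some (g + 1)) (some e)
        pvALoop cs (if enclosed.length ≠ 0 then result ++ [String.ofList enclosed] else result) (e + 1) fuel

def get_enclosed_strings (sentence : String) : List String :=
  pvALoop sentence.toList [] 0 (sentence.toList.length + 1)

-- ===== PORT B =====
-- Source B: chunks = sentence.split("<"); for chunk in chunks[:-1]:
--   pos = chunk.find(">"); if pos != -1 and pos + 1 < len(chunk): result.append(chunk[pos+1:])
-- str.split on a one-character separator is List.splitOn on the char list (empty pieces kept).
def get_enclosed_strings_alt (sentence : String) : List String :=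
  let chunks := sentence.toList.splitOn '<'
  (PySem.List.slice chunks none (some (-1))).foldl
    (fun result chunk =>
      let pos := PySem.Chars.find chunk ['>']
      if pos ≠ -1 ∧ pos + 1 < (chunk.length : Int) then
        result ++ [String.ofList (PySem.List.slice chunk (some (pos + 1)) none)]
      else result) []

-- ===== PRECONDITION & SPEC =====
def Spec_get_enclosed_strings (sentence : String) (out : List String) : Prop := out = get_enclosed_strings_alt sentence
instance (sentence : String) (out : List String) : Decidable (Spec_get_enclosed_strings sentence out) := by unfold Spec_get_enclosed_strings; infer_instance

-- ===== CLAIM (what is proved, stated in full; the proofs are below) =====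
def Claim_equal_get_enclosed_strings : Prop := ∀ (sentence : String), Dom_get_enclosed_strings sentence → Spec_get_enclosed_strings sentence (get_enclosed_strings sentence)


-- ===== LEMMAS AND PROOFS =====

-- Common yardstick both ports are proved equal to: pvCaps u lists, left to right,
-- the contents of the non-overlapping >…< enclosures of u (empty ones included).
def pvCaps : List Char → List (List Char)
  | [] => []
  | x :: u =>
    if x = '>' then
      match h : u.span (fun c => c ≠ '<') with
      | (_, []) => []
      | (cap, _y :: r) => cap :: pvCaps r
    else pvCaps u
termination_by cs => cs.length
decreasing_by
  · have h2 : u.dropWhile (fun c => c ≠ '<') = _y :: r := by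
      have := congrArg Prod.snd h; simpa [List.span_eq_takeWhile_dropWhile] using this
    have := List.length_dropWhile_le (p := fun c => decide (c ≠ '<')) (l := u)
    rw [h2] at this
    simp at this ⊢
    omega
  · simp

-- find.go never returns a value other than -1 below its starting offset
theorem pv_go_lb (sub : List Char) : ∀ (t : List Char) (k : Nat),
    PySem.Chars.find.go sub t k = -1 ∨ (k : Int) ≤ PySem.Chars.find.go sub t k := by
  intro t
  induction t with
  | nil => intro k; by_cases h : sub.isEmpty <;> simp [PySem.Chars.find.go, h]
  | cons x u ih =>
    intro k
    by_cases hp : sub.isPrefixOf (x :: u)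
    · simp [PySem.Chars.find.go, hp]
    · simp only [PySem.Chars.find.go, hp]
      rcases ih (k+1) with h | h
      · left; exact h
      · right; push_cast at h ⊢; omega

-- find.go at offset k is find.go at offset 0 shifted by k
theorem pv_go_shift (sub : List Char) (hs : sub ≠ []) : ∀ (t : List Char) (k : Nat),
    PySem.Chars.find.go sub t k = if PySem.Chars.find.go sub t 0 = -1 then -1 else PySem.Chars.find.go sub t 0 + k := by
  intro t
  induction t with
  | nil => intro k; simp [PySem.Chars.find.go, hs]
  | cons x u ih =>
    intro k
    by_cases hp : sub.isPrefixOf (x :: u)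
    · simp [PySem.Chars.find.go, hp]
    · simp only [PySem.Chars.find.go, hp]
      rw [ih (k+1), ih 1]
      rcases pv_go_lb sub u 0 with h | h
      · simp [h]
      · have h1 : PySem.Chars.find.go sub u 0 ≠ -1 := by omega
        simp only [h1, if_false]
        split_ifs <;> push_cast at * <;> omega

-- find of a single-character needle is the length of the prefix of other characters
theorem pv_find_single (c : Char) : ∀ (u : List Char),
    PySem.Chars.find u [c] = if c ∈ u then (((u.takeWhile (· ≠ c)).length : Nat) : Int) else -1 := by
  intro u
  induction u with
  | nil => simp [PySem.Chars.find, PySem.Chars.find.go]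
  | cons x u ih =>
    by_cases hx : c = x
    · subst hx
      simp [PySem.Chars.find, PySem.Chars.find.go, List.isPrefixOf, List.takeWhile]
    · have hp : ¬ ([c].isPrefixOf (x :: u)) := by
        simp [List.isPrefixOf]; exact fun h => (hx h).elim
      unfold PySem.Chars.find at *
      simp only [PySem.Chars.find.go, hp]
      rw [pv_go_shift [c] (by simp) u 1]
      rw [ih]
      by_cases hm : c ∈ u
      · simp only [List.mem_cons, hm, or_true, if_true, List.takeWhile]
        simp [Ne.symm hx]
      · simp [hm, hx]

theorem pv_findFrom_single (cs : List Char) (c : Char) (k : Nat) (hk : k ≤ cs.length) :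
    PySem.Chars.findFrom cs [c] (k : Int) none =
      if c ∈ cs.drop k then (((k + ((cs.drop k).takeWhile (· ≠ c)).length : Nat) : Nat) : Int) else -1 := by
  rw [PySem.Chars.findFrom_natCast cs [c] k hk, pv_find_single]
  by_cases hm : c ∈ cs.drop k
  · simp [hm]
  · simp [hm]

-- decomposition of a list at the first occurrence of c
theorem pv_decomp (c : Char) : ∀ (u : List Char), c ∈ u →
    u = u.takeWhile (· ≠ c) ++ c :: (u.dropWhile (· ≠ c)).tail := by
  intro u
  induction u with
  | nil => intro h; simp at h
  | cons x u ih =>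
    intro hm
    by_cases hx : x = c
    · subst hx
      simp [List.takeWhile, List.dropWhile]
    · have hxc : (decide (x ≠ c)) = true := by simp [hx]
      have hmu : c ∈ u := by
        rcases List.mem_cons.mp hm with h | h
        · exact absurd h.symm hx
        · exact h
      simp only [List.takeWhile, List.dropWhile, hxc, List.cons_append]
      exact congrArg (x :: ·) (ih hmu)

theorem pv_not_mem_takeWhile (c : Char) (u : List Char) : c ∉ u.takeWhile (· ≠ c) := by
  intro h
  have := List.mem_takeWhile_imp h
  simp at this

-- the capture scan ignores characters before the first '>'
theorem pvCaps_skip (w : List Char) : ∀ (t : List Char), '>' ∉ t → pvCaps (t ++ w) = pvCaps w := by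
  intro t
  induction t with
  | nil => simp
  | cons x t ih =>
    intro h
    have hx : ¬ (x = '>') := by simp at h; exact fun e => h.1 e.symm
    simp only [List.cons_append, pvCaps, hx, if_false]
    exact ih (by simp at h; exact fun e => h.2 e)

-- prefix without '<' is what takeWhile/dropWhile (≠ '<') produce on w ++ '<' :: v
theorem pv_takeWhile_append (v : List Char) : ∀ (w : List Char), '<' ∉ w →
    (w ++ '<' :: v).takeWhile (fun c => decide (c ≠ '<')) = w := by
  intro w
  induction w with
  | nil => intro _; simp [List.takeWhile]
  | cons x w ih =>
    intro h
    have hx : (decide (x ≠ '<')) = true := by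
      simp; intro e; exact h (e ▸ List.mem_cons_self)
    simp only [List.cons_append, List.takeWhile, hx]
    rw [ih (fun hm => h (List.mem_cons_of_mem _ hm))]

theorem pv_dropWhile_append (v : List Char) : ∀ (w : List Char), '<' ∉ w →
    (w ++ '<' :: v).dropWhile (fun c => decide (c ≠ '<')) = '<' :: v := by
  intro w
  induction w with
  | nil => intro _; simp [List.dropWhile]
  | cons x w ih =>
    intro h
    have hx : (decide (x ≠ '<')) = true := by
      simp; intro e; exact h (e ▸ List.mem_cons_self)
    simp only [List.cons_append, List.dropWhile, hx]
    exact ih (fun hm => h (List.mem_cons_of_mem _ hm))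

-- a '>' followed by a '<'-free span w then '<' :: v captures w and continues in v
theorem pvCaps_cons_gt (w v : List Char) (hw : '<' ∉ w) :
    pvCaps ('>' :: (w ++ '<' :: v)) = w :: pvCaps v := by
  simp only [pvCaps, if_true]
  have hspan : (w ++ '<' :: v).span (fun c => c ≠ '<') = (w, '<' :: v) := by
    rw [List.span_eq_takeWhile_dropWhile, pv_takeWhile_append v w hw, pv_dropWhile_append v w hw]
  rw [hspan]

-- with no '<' at all there is no closed enclosure
theorem pvCaps_no_lt : ∀ (u : List Char), '<' ∉ u → pvCaps u = [] := by
  intro u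
  induction u with
  | nil => simp [pvCaps]
  | cons x u ih =>
    intro h
    have hu : '<' ∉ u := fun hm => h (List.mem_cons_of_mem _ hm)
    by_cases hx : x = '>'
    · subst hx
      simp only [pvCaps, if_true]
      have hspan : u.span (fun c => c ≠ '<') = (u, []) := by
        rw [List.span_eq_takeWhile_dropWhile]
        have hdw : u.dropWhile (fun c => decide (c ≠ '<')) = [] := by
          rw [List.dropWhile_eq_nil_iff]
          intro y hy; simp; intro e; exact hu (e ▸ hy)
        have htw : u.takeWhile (fun c => decide (c ≠ '<')) = u := by
          rw [List.takeWhile_eq_self_iff]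
          intro y hy; simp; intro e; exact hu (e ▸ hy)
        rw [htw, hdw]
      rw [hspan]
    · simp only [pvCaps, hx, if_false]
      exact ih hu

-- one unfolding of A's loop body equals one capture step of the scan
theorem pvALoop_main (cs : List Char) : ∀ (fuel k : Nat) (res : List String),
    k ≤ cs.length → cs.length + 1 ≤ fuel + k →
    pvALoop cs res (k : Int) fuel =
      res ++ ((pvCaps (cs.drop k)).filter (fun c => ¬ c.isEmpty)).map String.ofList := by
  intro fuel
  induction fuel with
  | zero => intro k res hk hf; omega
  | succ fuel ih =>
    intro k res hk hf
    simp only [pvALoop]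
    rw [pv_findFrom_single cs '>' k hk]
    by_cases hg : '>' ∈ cs.drop k
    · -- a '>' exists; its index is m
      set t := (cs.drop k).takeWhile (· ≠ '>') with ht
      set v := ((cs.drop k).dropWhile (· ≠ '>')).tail with hv
      have hdec : cs.drop k = t ++ '>' :: v := pv_decomp '>' (cs.drop k) hg
      set m := k + t.length with hm
      have hdropm : cs.drop m = '>' :: v := by
        have : cs.drop m = (cs.drop k).drop t.length := by
          rw [List.drop_drop]
          try (congr 1 <;> omega)
        rw [this, hdec, List.drop_left]
      have hmlt : m < cs.length := by
        have := congrArg List.length hdropm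
        rw [List.length_drop, List.length_cons] at this
        omega
      have hgm : ((k + t.length : Nat) : Int) ≠ -1 := by omega
      simp only [hg, if_true]
      have hcast : ((m : Int) + 1) = ((m + 1 : Nat) : Int) := by push_cast; ring
      rw [hcast, pv_findFrom_single cs '<' (m+1) (by omega)]
      have hdropm1 : cs.drop (m+1) = v := by
        have h1 : cs.drop (m+1) = (cs.drop m).drop 1 := by
          rw [List.drop_drop]
          try (congr 1 <;> omega)
        rw [h1, hdropm]
        simp
      rw [hdropm1]
      have hcapsu : pvCaps (cs.drop k) = pvCaps ('>' :: v) := by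
        rw [hdec]
        exact pvCaps_skip ('>' :: v) t (pv_not_mem_takeWhile '>' (cs.drop k))
      by_cases hl : '<' ∈ v
      · -- a closing '<' exists; the capture is cap
        set cap := v.takeWhile (· ≠ '<') with hcap
        set r := (v.dropWhile (· ≠ '<')).tail with hr
        have hvdec : v = cap ++ '<' :: r := pv_decomp '<' v hl
        set q := m + 1 + cap.length with hq
        have hdropq : cs.drop q = '<' :: r := by
          have : cs.drop q = (cs.drop (m+1)).drop cap.length := by
            rw [List.drop_drop]
          try (congr 1 <;> omega)
          rw [this, hdropm1, hvdec, List.drop_left]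
        have hqlt : q < cs.length := by
          have := congrArg List.length hdropq
          simp at this; omega
        have hqe : ((m + 1 + cap.length : Nat) : Int) ≠ -1 := by omega
        simp only [hl, if_true]
        -- the slice is exactly the capture
        have hslice : PySem.List.slice cs (some (((m+1 : Nat)) : Int)) (some ((q:Nat) : Int)) = cap := by
          rw [PySem.List.slice_natCast]
          rw [hdropm1, hvdec]
          have : q - (m+1) = cap.length := by omega
          rw [this, List.take_left]
        rw [hslice]
        have hcast2 : ((q : Nat) : Int) + 1 = ((q + 1 : Nat) : Int) := by push_cast; ring
        rw [hcast2, ih (q+1) _ (by omega) (by omega)]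
        have hdropq1 : cs.drop (q+1) = r := by
          have h1 : cs.drop (q+1) = (cs.drop q).drop 1 := by
            rw [List.drop_drop]
          try (congr 1 <;> omega)
          rw [h1, hdropq]
          simp
        rw [hdropq1, hcapsu]
        have hcapscons : pvCaps ('>' :: v) = cap :: pvCaps r := by
          rw [hvdec]
          exact pvCaps_cons_gt cap r (pv_not_mem_takeWhile '<' v)
        rw [hcapscons]
        by_cases hce : cap = []
        · simp [hce]
        · have : cap.length ≠ 0 := by simpa using hce
          simp [this, hce, List.isEmpty_iff]
      · -- no closing '<': A stops; the scan finds no further match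
        simp only [hl, if_false]
        rw [hcapsu]
        have : pvCaps ('>' :: v) = [] := by
          have hvlt : '<' ∉ ('>' :: v) := by
            intro h; rcases List.mem_cons.mp h with h | h
            · exact absurd h (by decide)
            · exact hl h
          exact pvCaps_no_lt _ hvlt
        simp [this]
    · -- no '>' at all: A stops immediately and the scan yields nothing
      simp only [hg, if_false]
      have h0 : pvCaps (cs.drop k) = [] := by
        have h1 := pvCaps_skip [] (cs.drop k) hg
        simp only [List.append_nil] at h1
        rw [h1]
        simp [pvCaps]
      simp [h0]

-- chunks[:-1] is dropLast
theorem pv_slice_dropLast {α : Type} (l : List α) :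
    PySem.List.slice l none (some (-1)) = l.dropLast := by
  cases l with
  | nil => simp [PySem.List.slice, PySem.List.clampIdx]
  | cons x u =>
    simp only [PySem.List.slice, PySem.List.clampIdx]
    rw [List.dropLast_eq_take]
    have h1 : ¬ (((x :: u).length : Int) + (-1) < 0) := by simp
    simp only [show ((-1:Int) < 0) = True from by simp, if_true, h1, if_false]
    congr 1
    simp

-- B's predicate on a chunk, spelled out
theorem pv_chunk_step (chunk : List Char) :
    (if PySem.Chars.find chunk ['>'] ≠ -1 ∧ PySem.Chars.find chunk ['>'] + 1 < (chunk.length : Int) then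
        [String.ofList (PySem.List.slice chunk (some (PySem.Chars.find chunk ['>'] + 1)) none)]
      else ([] : List String)) =
    (if '>' ∈ chunk ∧ ((chunk.dropWhile (· ≠ '>')).tail ≠ []) then
        [String.ofList ((chunk.dropWhile (· ≠ '>')).tail)]
      else []) := by
  rw [pv_find_single]
  by_cases hm : '>' ∈ chunk
  · have hdec := pv_decomp '>' chunk hm
    set t := chunk.takeWhile (· ≠ '>') with ht
    set w := (chunk.dropWhile (· ≠ '>')).tail with hw
    have hlen : chunk.length = t.length + 1 + w.length := by
      conv_lhs => rw [hdec]
      simp; omega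
    simp only [hm, if_true, true_and]
    have h1 : ((t.length : Nat) : Int) ≠ -1 := by omega
    by_cases hwn : w = []
    · have : ¬ (((t.length : Nat) : Int) + 1 < (chunk.length : Int)) := by
        rw [hwn] at hlen; simp at hlen; omega
      simp [h1, this, hwn]
    · have hlt : (((t.length : Nat) : Int) + 1 < (chunk.length : Int)) := by
        have : w.length ≠ 0 := by simpa using hwn
        omega
      have hslice : PySem.List.slice chunk (some (((t.length : Nat) : Int) + 1)) none = w := by
        have hc : ((t.length : Nat) : Int) + 1 = (((t.length + 1 : Nat)) : Int) := by push_cast; ring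
        rw [hc, PySem.List.slice_from chunk (by omega)]
        conv_lhs => rw [hdec]
        have : ((t.length + 1 : Nat) : Int).toNat = t.length + 1 := by omega
        rw [this]
        rw [show t.length + 1 = t.length + 1 from rfl]
        rw [← List.drop_drop, List.drop_left]
        simp
      simp [h1, hlt, hwn, hslice]
  · simp [hm]

-- a filtered-append fold from any accumulator splits off the accumulator
theorem pv_fold_shape : ∀ (l : List (List Char)) (acc : List String),
    (l.foldl
      (fun result chunk =>
        let pos := PySem.Chars.find chunk ['>']
        if pos ≠ -1 ∧ pos + 1 < (chunk.length : Int) then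
          result ++ [String.ofList (PySem.List.slice chunk (some (pos + 1)) none)]
        else result) acc) =
    acc ++ (l.foldl
      (fun result chunk =>
        let pos := PySem.Chars.find chunk ['>']
        if pos ≠ -1 ∧ pos + 1 < (chunk.length : Int) then
          result ++ [String.ofList (PySem.List.slice chunk (some (pos + 1)) none)]
        else result) []) := by
  intro l
  induction l with
  | nil => intro acc; simp
  | cons x l ih =>
    intro acc
    simp only [List.foldl_cons]
    rw [ih]
    conv_rhs => rw [ih]
    split_ifs <;> simp

-- the chunk pass over splitOn equals the capture scan
theorem pvChunks_main : ∀ (n : Nat) (u : List Char), u.length ≤ n →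
    ((u.splitOn '<').dropLast.foldl
      (fun result chunk =>
        let pos := PySem.Chars.find chunk ['>']
        if pos ≠ -1 ∧ pos + 1 < (chunk.length : Int) then
          result ++ [String.ofList (PySem.List.slice chunk (some (pos + 1)) none)]
        else result) []) =
    ((pvCaps u).filter (fun c => ¬ c.isEmpty)).map String.ofList := by
  intro n
  induction n with
  | zero =>
    intro u hu
    have : u = [] := List.length_eq_zero_iff.mp (by omega)
    subst this
    simp [List.splitOn, List.splitOnP_nil, pvCaps]
  | succ n ih =>
    intro u hu
    by_cases hlt : '<' ∈ u
    · -- u = t ++ '<' :: v with '<' ∉ t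
      have hdec := pv_decomp '<' u hlt
      set t := u.takeWhile (· ≠ '<') with ht
      set v := (u.dropWhile (· ≠ '<')).tail with hv
      have hltt : '<' ∉ t := pv_not_mem_takeWhile '<' u
      have hnt : ∀ x ∈ t, ¬ ((x == '<') = true) := by
        intro x hx hb
        exact hltt ((beq_iff_eq.mp hb) ▸ hx)
      have hsplit : u.splitOn '<' = t :: v.splitOn '<' := by
        conv_lhs => rw [hdec]
        exact List.splitOnP_first (· == '<') t hnt '<' (by simp) v
      have hvlen : v.length ≤ n := by
        have := congrArg List.length hdec
        simp at this; omega
      have hnenil : v.splitOn '<' ≠ [] := List.splitOnP_ne_nil _ v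
      rw [hsplit, List.dropLast_cons_of_ne_nil hnenil]
      simp only [List.foldl_cons]
      rw [pv_fold_shape, ih v hvlen]
      have hstep := pv_chunk_step t
      by_cases hg : '>' ∈ t
      · -- t = q ++ '>' :: w, '>' ∉ q, '<' ∉ w
        obtain ⟨q, w, htdec, hgq, hwdef⟩ :
            ∃ q w, t = q ++ '>' :: w ∧ '>' ∉ q ∧ w = (t.dropWhile (· ≠ '>')).tail :=
          ⟨_, _, pv_decomp '>' t hg, pv_not_mem_takeWhile '>' t, rfl⟩
        rw [← hwdef] at hstep
        simp only [hg, true_and] at hstep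
        have hltw : '<' ∉ w := by
          intro hm
          apply hltt
          rw [htdec]
          exact List.mem_append.mpr (Or.inr (List.mem_cons_of_mem _ hm))
        have hcaps : pvCaps u = w :: pvCaps v := by
          conv_lhs => rw [hdec, htdec]
          rw [List.append_assoc, List.cons_append]
          rw [pvCaps_skip _ q hgq]
          exact pvCaps_cons_gt w v hltw
        rw [hcaps]
        by_cases hwn : w = []
        · rw [hwn] at hstep
          simp only [ne_eq, not_true_eq_false, if_false] at hstep
          simp [hstep, hwn]
        · rw [if_pos hwn] at hstep
          simp [hstep, hwn, List.filter_cons]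
      · -- no '>' in the head chunk: it contributes nothing and the scan skips it
        have hcaps : pvCaps u = pvCaps v := by
          conv_lhs => rw [hdec]
          rw [pvCaps_skip _ t hg]
          exact pvCaps_skip v ['<'] (by decide)
        rw [hcaps]
        simp only [hg, false_and, if_false] at hstep
        simp [hstep]
    · have hsingle : u.splitOn '<' = [u] := by
        apply List.splitOnP_eq_single
        intro x hx hb
        exact hlt ((eq_of_beq hb) ▸ hx)
      rw [hsingle]
      simp [pvCaps_no_lt u hlt]

-- ===== VERDICT (by name: the statement is the Claim_ definition above) =====
theorem get_enclosed_strings_spec : Claim_equal_get_enclosed_strings := by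
  intro s _
  unfold Spec_get_enclosed_strings get_enclosed_strings get_enclosed_strings_alt
  have hA := pvALoop_main s.toList (s.toList.length + 1) 0 [] (by omega) (by omega)
  have hB := pvChunks_main s.toList.length s.toList (le_refl _)
  show pvALoop s.toList [] 0 (s.toList.length + 1) =
    (PySem.List.slice (s.toList.splitOn '<') none (some (-1))).foldl
      (fun result chunk =>
        let pos := PySem.Chars.find chunk ['>']
        if pos ≠ -1 ∧ pos + 1 < (chunk.length : Int) then
          result ++ [String.ofList (PySem.List.slice chunk (some (pos + 1)) none)]
        else result) []
  rw [pv_slice_dropLast, hB]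
  simpa using hA
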